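-- pv_equiv track=rewrite | github.com/jt1986/sample_repo | src/transformation.py | transform_size
-- ===== SOURCE A (Python) =====
-- def transform_size(value, data_obj, magnitude):
--     size_data = data_obj[value]
--     for val in size_data:
--         if 500 <= val < 1000:
--             magnitude.append('massive')
--         elif 100 <= val < 500:
--             magnitude.append('big')
--         elif 50 <= val < 100:
--             magnitude.append('medium')
--         elif 10 <= val <50:
--             magnitude.append('small')
--         else:
--             magnitude.append('tiny')
--     return magnitude
-- ===== SOURCE B (Python) =====
-- THRESHOLDS = (10, 50, 100, 500, 1000)
-- LABELS = ('tiny', 'small', 'medium', 'big', 'massive', 'tiny')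
--
-- def transform_size(value, data_obj, magnitude):
--     magnitude.extend(LABELS[sum(v >= t for t in THRESHOLDS)]
--                      for v in data_obj[value])
--     return magnitude
-- ===== Notes on version B (the rewrite author's own statement) =====
-- stated objective: alternative
-- what changed: Replaces the branching if/elif range ladder with branch-free arithmetic indexing: count how many of the five sorted thresholds each value has reached and use that count as an index into a label table (whose ends are both 'tiny'), extending magnitude with the mapped labels in one pass.
import Mathlib
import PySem

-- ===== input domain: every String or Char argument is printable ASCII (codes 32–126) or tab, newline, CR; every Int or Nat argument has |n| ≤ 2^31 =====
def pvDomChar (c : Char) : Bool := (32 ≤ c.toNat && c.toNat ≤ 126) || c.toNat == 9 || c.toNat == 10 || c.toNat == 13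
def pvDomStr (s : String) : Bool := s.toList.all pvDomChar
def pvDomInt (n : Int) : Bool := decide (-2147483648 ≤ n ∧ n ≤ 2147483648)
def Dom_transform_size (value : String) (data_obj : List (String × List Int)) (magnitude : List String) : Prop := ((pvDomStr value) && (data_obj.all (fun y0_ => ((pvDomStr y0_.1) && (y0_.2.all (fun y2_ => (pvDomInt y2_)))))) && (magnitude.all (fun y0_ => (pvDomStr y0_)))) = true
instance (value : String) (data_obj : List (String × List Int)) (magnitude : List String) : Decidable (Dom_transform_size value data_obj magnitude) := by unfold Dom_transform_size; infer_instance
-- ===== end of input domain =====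

-- B replaces the if/elif ladder with branch-free arithmetic indexing (count of reached thresholds
-- indexes a label table); both Pythons mutate `magnitude` in place (append/extend) and return it —
-- the equivalence proved is about the return value.

-- ===== PORT A =====
def transform_size (value : String) (data_obj : List (String × List Int)) (magnitude : List String) : List String :=
  let size_data := ((PySem.Dict.mk data_obj).get? value).getD []
  size_data.foldl (fun mag val =>
    if 500 ≤ val ∧ val < 1000 then mag ++ ["massive"]
    else if 100 ≤ val ∧ val < 500 then mag ++ ["big"]
    else if 50 ≤ val ∧ val < 100 then mag ++ ["medium"]
    else if 10 ≤ val ∧ val < 50 then mag ++ ["small"]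
    else mag ++ ["tiny"]) magnitude

-- ===== PORT B =====
def pvThresholds : List Int := [10, 50, 100, 500, 1000]
def pvLabels : List String := ["tiny", "small", "medium", "big", "massive", "tiny"]

-- sum(v >= t for t in THRESHOLDS)
def pvCount (v : Int) : Nat :=
  pvThresholds.foldl (fun acc t => acc + (if t ≤ v then 1 else 0)) 0

def transform_size_alt (value : String) (data_obj : List (String × List Int)) (magnitude : List String) : List String :=
  let size_data := ((PySem.Dict.mk data_obj).get? value).getD []
  magnitude ++ size_data.map (fun v => pvLabels.getD (pvCount v) "")

-- ===== PRECONDITION & SPEC =====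
-- Pre_ excludes exactly the inputs where data_obj[value] raises KeyError (value not a key).
def Pre_transform_size (value : String) (data_obj : List (String × List Int)) (magnitude : List String) : Prop :=
  ((PySem.Dict.mk data_obj).get? value).isSome = true
instance (value : String) (data_obj : List (String × List Int)) (magnitude : List String) : Decidable (Pre_transform_size value data_obj magnitude) := by unfold Pre_transform_size; infer_instance

def pvWitness_transform_size : String × (List (String × List Int)) × List String :=
  ("k", [("k", [7, 500, 99])], ["x"])

def Spec_transform_size (value : String) (data_obj : List (String × List Int)) (magnitude : List String) (out : List String) : Prop := out = transform_size_alt value data_obj magnitude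
instance (value : String) (data_obj : List (String × List Int)) (magnitude : List String) (out : List String) : Decidable (Spec_transform_size value data_obj magnitude out) := by unfold Spec_transform_size; infer_instance

-- ===== CLAIM =====
def Claim_equal_transform_size : Prop := ∀ (value : String) (data_obj : List (String × List Int)) (magnitude : List String), Dom_transform_size value data_obj magnitude → Pre_transform_size value data_obj magnitude → Spec_transform_size value data_obj magnitude (transform_size value data_obj magnitude)

-- ===== LEMMAS AND PROOFS =====
theorem label_eq (val : Int) (mag : List String) :
    (if 500 ≤ val ∧ val < 1000 then mag ++ ["massive"]
     else if 100 ≤ val ∧ val < 500 then mag ++ ["big"]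
     else if 50 ≤ val ∧ val < 100 then mag ++ ["medium"]
     else if 10 ≤ val ∧ val < 50 then mag ++ ["small"]
     else mag ++ ["tiny"]) = mag ++ [pvLabels.getD (pvCount val) ""] := by
  simp only [pvCount, pvThresholds, List.foldl, pvLabels]
  split_ifs with h1 h2 h3 h4 <;> first | rfl | omega

theorem fold_eq (xs : List Int) (mag : List String) :
    xs.foldl (fun mag val =>
      if 500 ≤ val ∧ val < 1000 then mag ++ ["massive"]
      else if 100 ≤ val ∧ val < 500 then mag ++ ["big"]
      else if 50 ≤ val ∧ val < 100 then mag ++ ["medium"]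
      else if 10 ≤ val ∧ val < 50 then mag ++ ["small"]
      else mag ++ ["tiny"]) mag
    = mag ++ xs.map (fun v => pvLabels.getD (pvCount v) "") := by
  induction xs generalizing mag with
  | nil => simp
  | cons x xs ih =>
      rw [List.foldl_cons, label_eq, ih, List.map_cons]
      simp

-- ===== VERDICT =====
theorem transform_size_spec : Claim_equal_transform_size := by
  intro value data_obj magnitude _ _
  unfold Spec_transform_size transform_size transform_size_alt
  exact fold_eq _ _
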